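-- pv_equiv track=rewrite | github.com/va64doman/codility | Ex4-Algorithmic-skills/strSymmetryPoint.py | strSymmetryPoint
-- ===== SOURCE A (Python) =====
-- def strSymmetryPoint(S):
--     sLen = len(S)
--     # Symmetry point is possible, when and only when the
--     # string's length is odd.
--     if sLen % 2 == 0:
--         return -1
--     # With a odd-length string, the only possible symmetry
--     # point is the middle point.
--     mid = sLen // 2
--     begin, end = 0, sLen-1
--     # The middle point of an odd-length string is symmetry
--     # point, only when the string is symmetry.
--     while begin < mid:
--         if S[begin] != S[end]:
--             return -1
--         begin += 1
--         end -= 1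
--     return mid
--     pass
-- ===== SOURCE B (Python) =====
-- def strSymmetryPoint(S):
--     # Symmetry point exists only for odd-length strings.
--     if len(S) % 2 == 0:
--         return -1
--     # Odd length: the middle index is the symmetry point iff S is a palindrome.
--     return len(S) // 2 if S == S[::-1] else -1
-- ===== Notes on version B (the rewrite author's own statement) =====
-- stated objective: idiomatic
-- what changed: Replaces the explicit begin/end two-pointer while-loop with a bulk palindrome test: build the reversed string S[::-1] once and compare with ==, returning len(S)//2 on equality.
import Mathlib
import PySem

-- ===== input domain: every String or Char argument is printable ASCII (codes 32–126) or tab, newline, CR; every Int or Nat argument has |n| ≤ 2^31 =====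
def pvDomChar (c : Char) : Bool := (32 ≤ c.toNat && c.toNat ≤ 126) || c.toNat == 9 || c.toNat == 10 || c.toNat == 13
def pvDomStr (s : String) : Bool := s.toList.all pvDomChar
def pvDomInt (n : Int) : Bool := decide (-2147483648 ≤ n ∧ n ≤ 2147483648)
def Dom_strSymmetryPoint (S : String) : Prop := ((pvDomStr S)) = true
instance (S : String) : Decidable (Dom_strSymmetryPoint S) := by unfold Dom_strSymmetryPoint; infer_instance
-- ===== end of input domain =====

-- B replaces A's two-pointer inward scan with an idiomatic reverse-and-compare palindrome test (objective: idiomatic; no speed claim).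

-- ===== PORT A =====
-- the while-loop: while begin < mid: if S[begin] != S[end]: return -1; begin += 1; end -= 1; return mid
-- indices are always in range here (0 ≤ begin < mid ≤ end < len), so pyGetD is exact
def pvLoopA (l : List Char) (mid : Int) (b e : Int) : Int :=
  if b < mid then
    if PySem.List.pyGetD l b ' ' ≠ PySem.List.pyGetD l e ' ' then -1
    else pvLoopA l mid (b + 1) (e - 1)
  else mid
termination_by (mid - b).toNat
decreasing_by omega

def strSymmetryPoint (S : String) : Int :=
  let sLen : Int := S.toList.length
  if sLen % 2 == 0 then -1
  else
    let mid := PySem.Int.floordiv sLen 2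
    pvLoopA S.toList mid 0 (sLen - 1)

-- ===== PORT B =====
def strSymmetryPoint_alt (S : String) : Int :=
  if (S.toList.length : Int) % 2 == 0 then -1
  else if S.toList == S.toList.reverse then PySem.Int.floordiv (S.toList.length : Int) 2
  else -1

-- ===== PRECONDITION & SPEC =====
def Spec_strSymmetryPoint (S : String) (out : Int) : Prop := out = strSymmetryPoint_alt S
instance (S : String) (out : Int) : Decidable (Spec_strSymmetryPoint S out) := by unfold Spec_strSymmetryPoint; infer_instance

-- ===== CLAIM (what is proved, stated in full; the proofs are below) =====
def Claim_equal_strSymmetryPoint : Prop := ∀ (S : String), Dom_strSymmetryPoint S → Spec_strSymmetryPoint S (strSymmetryPoint S)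

-- ===== LEMMAS AND PROOFS =====

-- A's loop, started at begin = b with end = n-1-b, decides the half-palindrome condition from b on
theorem pvLoopA_spec (l : List Char) (b : Nat) (hb : b ≤ l.length / 2) :
    pvLoopA l ((l.length / 2 : Nat) : Int) (b : Int) ((l.length : Int) - 1 - (b : Int)) =
      (if ∀ i, b ≤ i → i < l.length / 2 → l[i]? = l[l.length - 1 - i]? then ((l.length / 2 : Nat) : Int) else -1) := by
  generalize hk : l.length / 2 - b = k
  induction k generalizing b with
  | zero =>
      have hbe : b = l.length / 2 := by omega
      have hnot : ¬ ((b : Int) < ((l.length / 2 : Nat) : Int)) := by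
        exact_mod_cast (by omega : ¬ b < l.length / 2)
      rw [pvLoopA, if_neg hnot, if_pos (fun i h1 h2 => absurd h2 (by omega))]
  | succ k ih =>
      have hlt : b < l.length / 2 := by omega
      have hbl : b < l.length := by omega
      have hel : l.length - 1 - b < l.length := by omega
      rw [pvLoopA]
      rw [if_pos (by exact_mod_cast hlt)]
      have h1 : PySem.List.pyGetD l (b : Int) ' ' = l[b] := by
        rw [PySem.List.pyGetD_eq_getElem l ' ' (by omega) (by exact_mod_cast hbl)]
        simp
      have hecast : ((l.length : Int) - 1 - (b : Int)) = ((l.length - 1 - b : Nat) : Int) := by omega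
      have h2 : PySem.List.pyGetD l ((l.length : Int) - 1 - (b : Int)) ' ' = l[l.length - 1 - b] := by
        rw [hecast, PySem.List.pyGetD_eq_getElem l ' ' (by omega) (by exact_mod_cast hel)]
        simp
      rw [h1, h2]
      by_cases hc : l[b] = l[l.length - 1 - b]
      · rw [if_neg (by simpa using hc)]
        have hrec : ((b : Int) + 1) = ((b + 1 : Nat) : Int) := by omega
        have hrec2 : ((l.length : Int) - 1 - (b : Int) - 1) = ((l.length : Int) - 1 - ((b + 1 : Nat) : Int)) := by
          push_cast; omega
        rw [hrec, hrec2, ih (b + 1) (by omega) (by omega)]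
        by_cases hall : ∀ i, b + 1 ≤ i → i < l.length / 2 → l[i]? = l[l.length - 1 - i]?
        · rw [if_pos hall, if_pos]
          intro i hi1 hi2
          rcases Nat.eq_or_lt_of_le hi1 with h | h
          · subst h; simp [List.getElem?_eq_getElem hbl, List.getElem?_eq_getElem hel, hc]
          · exact hall i h hi2
        · rw [if_neg hall, if_neg]
          intro hcon; exact hall (fun i hi1 hi2 => hcon i (by omega) hi2)
      · rw [if_pos (by simpa using hc)]
        rw [if_neg]
        intro hcon
        have := hcon b (le_refl b) hlt
        rw [List.getElem?_eq_getElem hbl, List.getElem?_eq_getElem hel] at this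
        exact hc (by simpa using this)

-- for odd length, matching the first half against the mirrored second half is the full palindrome condition
theorem half_palindrome_iff (l : List Char) (hodd : l.length % 2 = 1) :
    (∀ i, 0 ≤ i → i < l.length / 2 → l[i]? = l[l.length - 1 - i]?) ↔ l = l.reverse := by
  constructor
  · intro h
    apply List.ext_getElem (by simp)
    intro i hi _
    have hi' : i < l.length := hi
    have hmir : l.length - 1 - (l.length - 1 - i) = i := by omega
    have key : ∀ j, j < l.length → l[j]? = l[l.length - 1 - j]? := by
      intro j hj
      by_cases h1 : j < l.length / 2
      · exact h j (Nat.zero_le j) h1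
      · by_cases h2 : j = l.length / 2
        · have : l.length - 1 - j = j := by omega
          rw [this]
        · have hj' : l.length - 1 - j < l.length / 2 := by omega
          have := h _ (Nat.zero_le _) hj'
          have hm : l.length - 1 - (l.length - 1 - j) = j := by omega
          rw [hm] at this
          exact this.symm
    have := key i hi'
    rw [List.getElem?_eq_getElem hi', List.getElem?_eq_getElem (by omega : l.length - 1 - i < l.length)] at this
    rw [List.getElem_reverse]
    simpa using this
  · intro h i _ hi
    have hi' : i < l.length := by omega
    have hrev : l.reverse[i]'(by simpa using hi') = l[l.length - 1 - i]'(by omega) := List.getElem_reverse _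
    rw [List.getElem?_eq_getElem hi', List.getElem?_eq_getElem (by omega : l.length - 1 - i < l.length)]
    rw [Option.some_inj, ← hrev]
    congr 1

-- ===== VERDICT (by name: the statement is the Claim_ definition above) =====
theorem strSymmetryPoint_spec : Claim_equal_strSymmetryPoint := by
  intro S _
  unfold Spec_strSymmetryPoint strSymmetryPoint strSymmetryPoint_alt
  set l := S.toList with hl
  simp only []
  by_cases hev : (l.length : Int) % 2 = 0
  · simp [hev]
  · have hodd : l.length % 2 = 1 := by omega
    simp only [beq_iff_eq, if_neg hev]
    have hfd : PySem.Int.floordiv (l.length : Int) 2 = ((l.length / 2 : Nat) : Int) := by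
      exact_mod_cast PySem.Int.floordiv_natCast l.length 2
    rw [hfd]
    have h0 : ((0 : Nat) : Int) = (0 : Int) := rfl
    have := pvLoopA_spec l 0 (Nat.zero_le _)
    rw [h0, sub_zero] at this
    rw [this]
    have hiff := half_palindrome_iff l hodd
    by_cases hp : l = l.reverse
    · rw [if_pos (fun i _ hi => (hiff.mpr hp) i (Nat.zero_le i) hi), if_pos (by simpa using hp)]
    · rw [if_neg (fun hcon => hp (hiff.mp (fun i _ hi => hcon i (Nat.zero_le i) hi))), if_neg (by simpa using hp)]
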